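-- pv_equiv track=rewrite | github.com/kevsman/pokerplayer | enhanced_board_analysis_fixed.py | _has_gutshot_draw
-- ===== SOURCE A (Python) =====
-- from typing import List, Dict, Tuple, Optional
-- import itertools
--
-- def _has_gutshot_draw(ranks: List[int]) -> bool:
--     """Check for gutshot straight draw."""
--     if len(ranks) < 3:
--         return False
--
--     # Look for ranks with gaps that could be filled
--     for combo in itertools.combinations(ranks, min(3, len(ranks))):
--         sorted_combo = sorted(combo)
--         if len(sorted_combo) >= 3:
--             span = sorted_combo[-1] - sorted_combo[0]
--             if span == 4 and len(sorted_combo) == 3: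
--                 return True
--     return False
-- ===== SOURCE B (Python) =====
-- def _has_gutshot_draw(ranks):
--     """Check for gutshot straight draw: some 3 ranks span exactly 4."""
--     if len(ranks) < 3:
--         return False
--     s = sorted(ranks)
--     n = len(s)
--     for i in range(n):
--         for k in range(i + 2, n):
--             if s[k] - s[i] == 4:
--                 return True
--     return False
-- ===== Notes on version B (the rewrite author's own statement) =====
-- stated objective: faster
-- what changed: Replaced the enumeration of all 3-element combinations (each re-sorted) by one sort of the ranks followed by a pair scan over sorted indices i<k with k-i>=2 testing s[k]-s[i]==4; the in-between index guarantees the third card of the span.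
import Mathlib
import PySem

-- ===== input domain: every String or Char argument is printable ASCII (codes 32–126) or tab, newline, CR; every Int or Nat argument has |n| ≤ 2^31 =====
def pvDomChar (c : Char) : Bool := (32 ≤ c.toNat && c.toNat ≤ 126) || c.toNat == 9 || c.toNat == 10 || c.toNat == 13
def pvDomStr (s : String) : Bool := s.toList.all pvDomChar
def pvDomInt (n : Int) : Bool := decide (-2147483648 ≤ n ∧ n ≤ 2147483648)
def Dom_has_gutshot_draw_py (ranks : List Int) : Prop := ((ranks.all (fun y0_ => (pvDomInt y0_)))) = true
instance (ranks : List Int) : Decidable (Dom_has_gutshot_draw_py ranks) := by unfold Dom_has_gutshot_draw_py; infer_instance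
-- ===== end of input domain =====

-- B replaces A's enumeration of all 3-combinations (each re-sorted) by one sort plus a
-- pair scan over sorted indices i<k with k-i>=2 testing s[k]-s[i]==4 (objective: faster).

-- ===== PORT A =====
-- itertools.combinations(ranks, 2) / (ranks, 3), ported by hand in itertools' index order
def pvCombos2 : List Int → List (Int × Int)
  | [] => []
  | x :: xs => (xs.map (fun y => (x, y))) ++ pvCombos2 xs

def pvCombos3 : List Int → List (Int × Int × Int)
  | [] => []
  | x :: xs => ((pvCombos2 xs).map (fun p => (x, p.1, p.2))) ++ pvCombos3 xs

def has_gutshot_draw_py (ranks : List Int) : Bool :=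
  if ranks.length < 3 then false
  else
    -- for combo in combinations(ranks, 3): … return True  ≡  any over the combination list
    (pvCombos3 ranks).any (fun t =>
      let sc := PySem.List.sorted [t.1, t.2.1, t.2.2] (fun v => v)
      if 3 ≤ sc.length then
        -- span = sorted_combo[-1] - sorted_combo[0]
        decide (PySem.List.pyGetD sc (-1) 0 - PySem.List.pyGetD sc 0 0 = 4) &&
          decide (sc.length = 3)
      else false)

-- ===== PORT B =====
def has_gutshot_draw_py_alt (ranks : List Int) : Bool :=
  if ranks.length < 3 then false
  else
    let s := PySem.List.sorted ranks (fun v => v)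
    let n : Int := s.length
    (PySem.List.pyRange 0 n).any (fun i =>
      (PySem.List.pyRange (i + 2) n).any (fun k =>
        decide (PySem.List.pyGetD s k 0 - PySem.List.pyGetD s i 0 = 4)))

-- ===== PRECONDITION & SPEC =====
def Spec_has_gutshot_draw_py (ranks : List Int) (out : Bool) : Prop := out = has_gutshot_draw_py_alt ranks
instance (ranks : List Int) (out : Bool) : Decidable (Spec_has_gutshot_draw_py ranks out) := by unfold Spec_has_gutshot_draw_py; infer_instance

-- ===== CLAIM (what is proved, stated in full; the proofs are below) =====
def Claim_equal_has_gutshot_draw_py : Prop := ∀ (ranks : List Int), Dom_has_gutshot_draw_py ranks → Spec_has_gutshot_draw_py ranks (has_gutshot_draw_py ranks)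

-- ===== LEMMAS AND PROOFS =====

-- Both programs detect the same condition: a sorted 3-element sublist of sorted(ranks) spanning 4.
def GutQ (l : List Int) : Prop :=
  ∃ x y z : Int, [x, y, z].Sublist (PySem.List.sorted l (fun v => v)) ∧ z - x = 4

lemma mem_combos2 (l : List Int) (a b : Int) :
    (a, b) ∈ pvCombos2 l ↔ [a, b].Sublist l := by
  induction l with
  | nil => simp [pvCombos2]
  | cons x xs ih =>
    simp only [pvCombos2, List.mem_append, List.mem_map, ih, List.sublist_cons_iff]
    constructor
    · rintro (⟨y, hy, h⟩ | h)
      · cases h; exact Or.inr ⟨[b], rfl, List.singleton_sublist.mpr hy⟩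
      · exact Or.inl h
    · rintro (h | ⟨r, hr, hs⟩)
      · exact Or.inr h
      · rw [List.cons_eq_cons] at hr
        obtain ⟨rfl, rfl⟩ := hr
        exact Or.inl ⟨b, List.singleton_sublist.mp hs, rfl⟩

lemma mem_combos3 (l : List Int) (a b c : Int) :
    (a, b, c) ∈ pvCombos3 l ↔ [a, b, c].Sublist l := by
  induction l with
  | nil => simp [pvCombos3]
  | cons x xs ih =>
    simp only [pvCombos3, List.mem_append, List.mem_map, ih, List.sublist_cons_iff]
    constructor
    · rintro (⟨p, hp, h⟩ | h)
      · obtain ⟨p1, p2⟩ := p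
        cases h
        exact Or.inr ⟨[p1, p2], rfl, (mem_combos2 xs _ _).mp hp⟩
      · exact Or.inl h
    · rintro (h | ⟨r, hr, hs⟩)
      · exact Or.inr h
      · rw [List.cons_eq_cons] at hr
        obtain ⟨rfl, rfl⟩ := hr
        exact Or.inl ⟨(b, c), (mem_combos2 xs b c).mpr hs, rfl⟩

lemma sorted_triple (a b c : Int) :
    ∃ x y z : Int, PySem.List.sorted [a, b, c] (fun v => v) = [x, y, z] ∧
      x ≤ y ∧ y ≤ z ∧ [x, y, z].Perm [a, b, c] := by
  have hlen : (PySem.List.sorted [a, b, c] (fun v => v)).length = 3 := by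
    rw [PySem.List.length_sorted]; rfl
  obtain ⟨x, y, z, hxyz⟩ := List.length_eq_three.mp hlen
  have hp := PySem.List.sorted_pairwise [a, b, c] (fun v => v)
  have hperm := PySem.List.sorted_perm [a, b, c] (fun v => v) false
  rw [hxyz] at hp hperm
  simp only [List.pairwise_cons, List.mem_cons] at hp
  exact ⟨x, y, z, hxyz, hp.1 y (Or.inl rfl), hp.2.1 z (Or.inl rfl), hperm⟩

lemma GutQ_length {l : List Int} (h : GutQ l) : 3 ≤ l.length := by
  obtain ⟨x, y, z, hs, _⟩ := h
  have := hs.length_le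
  rwa [PySem.List.length_sorted] at this

lemma A_iff (l : List Int) : has_gutshot_draw_py l = true ↔ GutQ l := by
  constructor
  · intro h
    unfold has_gutshot_draw_py at h
    split at h
    · exact absurd h (by simp)
    · obtain ⟨⟨a, b, c⟩, hmem, hcond⟩ := List.any_eq_true.mp h
      obtain ⟨x, y, z, hsc, hxy, hyz, hperm⟩ := sorted_triple a b c
      simp only [hsc] at hcond
      norm_num [PySem.List.pyGetD, PySem.List.pyGet?, PySem.List.pyIdx?] at hcond
      -- [x,y,z] is a permutation of a sublist of l, hence a subpermutation of sorted l
      have hsub : [a, b, c].Sublist l := (mem_combos3 l a b c).mp hmem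
      have hsp : [x, y, z].Subperm (PySem.List.sorted l (fun v => v)) :=
        ((hperm.subperm).trans hsub.subperm).trans
          (PySem.List.sorted_perm l (fun v => v) false).symm.subperm
      obtain ⟨ys, hys, hyss⟩ := hsp
      -- ys is a sorted permutation of the sorted [x,y,z], hence equal to it
      have hys_sorted : ys.Pairwise (· ≤ ·) :=
        List.Pairwise.sublist hyss (PySem.List.sorted_pairwise l (fun v => v))
      have hxyz_sorted : List.Pairwise (fun u v : Int => u ≤ v) [x, y, z] := by
        refine List.Pairwise.cons ?_ (List.Pairwise.cons ?_ (List.pairwise_singleton _ _))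
        · intro a ha
          rcases List.mem_cons.mp ha with rfl | ha
          · exact hxy
          · rw [List.mem_singleton] at ha; subst ha; exact le_trans hxy hyz
        · intro a ha; rw [List.mem_singleton] at ha; subst ha; exact hyz
      have : ys = [x, y, z] :=
        hys.eq_of_pairwise (fun a b _ _ h1 h2 => le_antisymm h1 h2) hys_sorted hxyz_sorted
      subst this
      exact ⟨x, y, z, hyss, hcond⟩
  · intro h
    obtain ⟨x, y, z, hs, hzx⟩ := h
    unfold has_gutshot_draw_py
    have hlen := GutQ_length ⟨x, y, z, hs, hzx⟩
    rw [if_neg (by omega)]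
    -- recover an original-order triple of l whose elements are x,y,z
    have hsp : [x, y, z].Subperm l :=
      hs.subperm.trans (PySem.List.sorted_perm l (fun v => v) false).subperm
    obtain ⟨ws, hws, hwss⟩ := hsp
    obtain ⟨a, b, c, habc⟩ := List.length_eq_three.mp (hws.length_eq.trans rfl)
    subst habc
    refine List.any_eq_true.mpr ⟨(a, b, c), (mem_combos3 l a b c).mpr hwss, ?_⟩
    have hxyz_sorted : List.Pairwise (fun u v : Int => u ≤ v) [x, y, z] :=
      List.Pairwise.sublist hs (PySem.List.sorted_pairwise l (fun v => v))
    have hsc : PySem.List.sorted [a, b, c] (fun v => v) = [x, y, z] :=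
      PySem.List.sorted_id_eq_of_perm_of_pairwise _ _ hws.symm hxyz_sorted
    simp only [hsc]
    norm_num [PySem.List.pyGetD, PySem.List.pyGet?, PySem.List.pyIdx?]
    exact hzx

lemma B_iff (l : List Int) : has_gutshot_draw_py_alt l = true ↔ GutQ l := by
  constructor
  · intro h
    unfold has_gutshot_draw_py_alt at h
    split at h
    · exact absurd h (by simp)
    · set s := PySem.List.sorted l (fun v => v) with hs
      obtain ⟨i, hi, hinner⟩ := List.any_eq_true.mp h
      obtain ⟨k, hk, hcond⟩ := List.any_eq_true.mp hinner
      rw [PySem.List.mem_pyRange_one] at hi hk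
      have hslen : (s.length : Int) = l.length := by rw [hs, PySem.List.length_sorted]
      have hiN : i.toNat < s.length := by omega
      have hkN : k.toNat < s.length := by omega
      have hik : i.toNat + 2 ≤ k.toNat := by omega
      have hgi := PySem.List.pyGetD_eq_getElem s (i := i) 0 (by omega) (by omega)
      have hgk := PySem.List.pyGetD_eq_getElem s (i := k) 0 (by omega) (by omega)
      rw [hgi, hgk, decide_eq_true_iff] at hcond
      refine ⟨s[i.toNat], s[i.toNat + 1], s[k.toNat], ?_, hcond⟩
      have : List.map (fun j : Fin s.length => s[j])
          [⟨i.toNat, hiN⟩, ⟨i.toNat + 1, by omega⟩, ⟨k.toNat, hkN⟩] =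
          [s[i.toNat], s[i.toNat + 1], s[k.toNat]] := rfl
      rw [← this]
      refine List.map_getElem_sublist ?_
      refine List.Pairwise.cons ?_ (List.Pairwise.cons ?_ (List.pairwise_singleton _ _))
      · intro a ha
        rcases List.mem_cons.mp ha with rfl | ha
        · exact Fin.mk_lt_mk.mpr (by omega)
        · rw [List.mem_singleton] at ha; subst ha; exact Fin.mk_lt_mk.mpr (by omega)
      · intro a ha; rw [List.mem_singleton] at ha; subst ha; exact Fin.mk_lt_mk.mpr (by omega)
  · intro h
    obtain ⟨x, y, z, hsub, hzx⟩ := h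
    unfold has_gutshot_draw_py_alt
    have hlen := GutQ_length ⟨x, y, z, hsub, hzx⟩
    rw [if_neg (by omega)]
    set s := PySem.List.sorted l (fun v => v) with hs
    obtain ⟨is, his, hpw⟩ := List.sublist_eq_map_getElem hsub
    have hislen : is.length = 3 := by
      have := congrArg List.length his
      simpa using this.symm
    obtain ⟨i, j, k, hijk⟩ := List.length_eq_three.mp hislen
    subst hijk
    simp only [List.map_cons, List.map_nil, List.cons_eq_cons] at his
    obtain ⟨hx, hy, hz, -⟩ := his
    simp only [Fin.getElem_fin] at hx hy hz
    simp only [List.pairwise_cons, List.mem_cons] at hpw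
    have hij : (i : Nat) < j := hpw.1 j (Or.inl rfl)
    have hjk : (j : Nat) < k := hpw.2.1 k (Or.inl rfl)
    have hslen : (s.length : Int) = l.length := by rw [hs, PySem.List.length_sorted]
    refine List.any_eq_true.mpr ⟨(i : Nat), ?_, List.any_eq_true.mpr ⟨(k : Nat), ?_, ?_⟩⟩
    · rw [PySem.List.mem_pyRange_one]
      have := i.isLt; constructor <;> omega
    · rw [PySem.List.mem_pyRange_one]
      have := k.isLt; constructor <;> omega
    · have hgi := PySem.List.pyGetD_eq_getElem s (i := ((i : Nat) : Int)) 0 (by omega)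
        (by exact_mod_cast i.isLt)
      have hgk := PySem.List.pyGetD_eq_getElem s (i := ((k : Nat) : Int)) 0 (by omega)
        (by exact_mod_cast k.isLt)
      rw [hgi, hgk, decide_eq_true_iff]
      simp only [Int.toNat_natCast]
      rw [← hx, ← hz]; exact hzx

-- ===== VERDICT (by name: the statement is the Claim_ definition above) =====
theorem has_gutshot_draw_py_spec : Claim_equal_has_gutshot_draw_py := by
  intro ranks _
  unfold Spec_has_gutshot_draw_py
  cases hA : has_gutshot_draw_py ranks with
  | true => exact ((B_iff ranks).mpr ((A_iff ranks).mp hA)).symm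
  | false =>
    cases hB : has_gutshot_draw_py_alt ranks with
    | true =>
      exfalso
      have h2 := (A_iff ranks).mpr ((B_iff ranks).mp hB)
      rw [hA] at h2
      exact Bool.false_ne_true h2
    | false => rfl
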